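-- pv_equiv track=rewrite | github.com/maxde18/mcp-bench | utils/collect_mcp_info.py | extract_package_name
-- ===== SOURCE A (Python) =====
-- from typing import Dict, Any, List
--
-- def extract_package_name(command: List[str]) -> str:
--     """Extract the actual package name from the command array.
--
--     Args:
--         command: List of command parts
--
--     Returns:
--         Extracted package name or 'unknown-package' if not found
--     """
--     # Look for "run" and get the next parameter
--     if "run" in command:
--         idx = command.index("run")
--         if idx + 1 < len(command):
--             return command[idx + 1]
--
--     # Look for @ prefixed packages (skip @smithery/cli)
--     for arg in command:
--         if arg.startswith("@") and "smithery/cli" not in arg: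
--             return arg
--
--     # Look for non-option arguments
--     for arg in command:
--         if not arg.startswith("-") and "/" not in arg and arg != "npx" and not arg.endswith("npx"):
--             return arg
--
--     # Fallback - should not happen
--     return "unknown-package"
-- ===== SOURCE B (Python) =====
-- def extract_package_name(command):
--     """Extract the actual package name from the command array (single pass)."""
--     run_next = None
--     expect_next = False
--     seen_run = False
--     at_cand = None
--     plain_cand = None
--     for arg in command:
--         if expect_next:
--             run_next = arg
--             expect_next = False
--         if not seen_run and arg == "run":
--             seen_run = True
--             expect_next = True
--         if at_cand is None and arg.startswith("@") and "smithery/cli" not in arg: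
--             at_cand = arg
--         if plain_cand is None and not arg.startswith("-") and "/" not in arg and arg != "npx" and not arg.endswith("npx"):
--             plain_cand = arg
--     if run_next is not None:
--         return run_next
--     if at_cand is not None:
--         return at_cand
--     if plain_cand is not None:
--         return plain_cand
--     return "unknown-package"
-- ===== Notes on version B (the rewrite author's own statement) =====
-- stated objective: alternative
-- what changed: Replaces the membership-test + index lookup + two separate full scans with one single pass over the list that records the element after the first 'run' and the first '@'-candidate and first plain candidate, resolving priority after the loop.
import Mathlib
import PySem

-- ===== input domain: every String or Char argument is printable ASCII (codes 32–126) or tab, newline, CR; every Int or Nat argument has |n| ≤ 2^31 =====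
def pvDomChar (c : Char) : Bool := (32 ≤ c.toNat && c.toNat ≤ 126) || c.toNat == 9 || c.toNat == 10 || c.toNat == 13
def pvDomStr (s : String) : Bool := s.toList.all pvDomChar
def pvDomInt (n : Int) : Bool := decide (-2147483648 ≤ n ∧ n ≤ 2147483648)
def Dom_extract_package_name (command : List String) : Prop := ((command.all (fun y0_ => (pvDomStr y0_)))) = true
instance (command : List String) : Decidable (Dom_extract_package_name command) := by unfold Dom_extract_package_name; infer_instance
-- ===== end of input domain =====

-- B replaces A's membership test + index lookup + two separate scans by one single pass
-- recording the run-successor and the first candidate of each kind (objective: alternative).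

-- shared condition helpers (the literal conditions of both Pythons)
def predAt (arg : String) : Bool :=
  PySem.Str.startswith arg "@" && !(PySem.Str.isIn "smithery/cli" arg)

def predPlain (arg : String) : Bool :=
  !(PySem.Str.startswith arg "-") && !(PySem.Str.isIn "/" arg)
    && !(arg == "npx") && !(PySem.Str.endswith arg "npx")

-- ===== PORT A =====
-- A's first for-loop ('return arg' on first hit)
def scanAt : List String → Option String
  | [] => none
  | arg :: rest => if predAt arg then some arg else scanAt rest

-- A's second for-loop
def scanPlain : List String → Option String
  | [] => none
  | arg :: rest => if predPlain arg then some arg else scanPlain rest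

def extract_package_name (command : List String) : String :=
  -- the code after the 'run' block: two scans then the fallback
  let tail : String :=
    match scanAt command with
    | some a => a
    | none =>
      match scanPlain command with
      | some a => a
      | none => "unknown-package"
  if command.contains "run" then
    match PySem.List.index? command "run" with
    | some idx => if idx + 1 < command.length then command.getD (idx + 1) "" else tail
    | none => tail
  else tail

-- ===== PORT B =====
-- B's single loop: state = (runNext, expectNext, seenRun, atCand, plainCand)
def loopB : List String → Option String → Bool → Bool → Option String → Option String → String
  | [], runNext, _, _, atC, plainC =>
    match runNext with
    | some x => x
    | none =>
      match atC with
      | some a => a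
      | none =>
        match plainC with
        | some p => p
        | none => "unknown-package"
  | arg :: rest, runNext, expect, seen, atC, plainC =>
    let runNext := if expect then some arg else runNext
    let flags : Bool × Bool := if !seen && arg == "run" then (true, true) else (false, seen)
    let atC := if atC.isNone && predAt arg then some arg else atC
    let plainC := if plainC.isNone && predPlain arg then some arg else plainC
    loopB rest runNext flags.1 flags.2 atC plainC

def extract_package_name_alt (command : List String) : String :=
  loopB command none false false none none

-- ===== PRECONDITION & SPEC =====
def Spec_extract_package_name (command : List String) (out : String) : Prop := out = extract_package_name_alt command
instance (command : List String) (out : String) : Decidable (Spec_extract_package_name command out) := by unfold Spec_extract_package_name; infer_instance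

-- ===== CLAIM (what is proved, stated in full; the proofs are below) =====
def Claim_equal_extract_package_name : Prop := ∀ (command : List String), Dom_extract_package_name command → Spec_extract_package_name command (extract_package_name command)

-- ===== LEMMAS AND PROOFS =====

-- priority resolution (B's final if-chain / A's fall-through, as a function)
def resolve (rn atC plainC : Option String) : String :=
  match rn with
  | some x => x
  | none =>
    match atC with
    | some a => a
    | none =>
      match plainC with
      | some p => p
      | none => "unknown-package"

-- first-some choice
def oor (x y : Option String) : Option String :=
  match x with
  | some a => some a
  | none => y

-- the element after the first "run", if any
def afterRun : List String → Option String
  | [] => none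
  | a :: rest => if a = "run" then rest.head? else afterRun rest

theorem loopB_done (l : List String) (x : String) (a p : Option String) :
    loopB l (some x) false true a p = x := by
  induction l generalizing a p with
  | nil => rfl
  | cons arg rest ih => simp [loopB, ih]

theorem loopB_expect (l : List String) (a p : Option String) :
    loopB l none true true a p = resolve l.head? (oor a (scanAt l)) (oor p (scanPlain l)) := by
  cases l with
  | nil => cases a <;> cases p <;> rfl
  | cons arg rest => simp [loopB, loopB_done, resolve]

theorem afterRun_eq (c : List String) :
    afterRun c = (match PySem.List.index? c "run" with
      | some idx => if idx + 1 < c.length then some (c.getD (idx + 1) "") else none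
      | none => none) := by
  induction c with
  | nil => rfl
  | cons a rest ih =>
    by_cases h : a = "run"
    · subst h
      rw [PySem.List.index?_cons_self]
      cases rest with
      | nil => rfl
      | cons b t => simp [afterRun, List.head?]
    · rw [PySem.List.index?_cons_of_ne rest h]
      simp only [afterRun, if_neg h, ih]
      cases hidx : PySem.List.index? rest "run" with
      | none => rfl
      | some k =>
        simp only [Option.map_some]
        have hiff : k + 1 + 1 < (a :: rest).length ↔ k + 1 < rest.length := by
          simp [List.length_cons]
        by_cases hk : k + 1 < rest.length
        · rw [if_pos hk, if_pos (hiff.mpr hk)]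
          simp
        · rw [if_neg hk, if_neg (fun hc => hk (hiff.mp hc))]

theorem A_eq_resolve (c : List String) :
    extract_package_name c = resolve (afterRun c) (scanAt c) (scanPlain c) := by
  unfold extract_package_name
  rw [afterRun_eq c]
  by_cases hc : c.contains "run"
  · rw [if_pos hc]
    have hmem : "run" ∈ c := by simpa using hc
    cases hidx : PySem.List.index? c "run" with
    | none => exact absurd ((PySem.List.index?_eq_none_iff c "run").mp hidx) (by simpa using hmem)
    | some idx =>
      by_cases hl : idx + 1 < c.length
      · simp only [hl, if_true, resolve]
      · simp only [hl, if_false, resolve]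
  · rw [if_neg hc]
    rw [(PySem.List.index?_eq_none_iff c "run").mpr (by simpa using hc)]
    rfl

theorem loopB_start (l : List String) (a p : Option String) :
    loopB l none false false a p = resolve (afterRun l) (oor a (scanAt l)) (oor p (scanPlain l)) := by
  induction l generalizing a p with
  | nil => cases a <;> cases p <;> rfl
  | cons arg rest ih =>
    by_cases h : arg = "run"
    · subst h
      have hAt : predAt "run" = false := by decide
      have hPl : predPlain "run" = true := by decide
      simp only [loopB, hAt, hPl]
      simp
      rw [loopB_expect]
      simp only [afterRun, scanAt, hAt, Bool.false_eq_true, if_false,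
        scanPlain, hPl, if_true]
      congr 1
      cases p <;> simp [oor]
    · have hbe : (arg == "run") = false := by simpa using h
      simp only [loopB, hbe, Bool.and_false]
      simp only [Bool.false_eq_true, if_false]
      rw [ih]
      simp only [afterRun, if_neg h, scanAt, scanPlain]
      congr 1
      · cases a with
        | some x => simp [oor]
        | none => by_cases hp : predAt arg = true <;> simp [oor, hp]
      · cases p with
        | some x => simp [oor]
        | none => by_cases hp : predPlain arg = true <;> simp [oor, hp]

-- ===== VERDICT (by name: the statement is the Claim_ definition above) =====
theorem extract_package_name_spec : Claim_equal_extract_package_name := by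
  intro command _
  unfold Spec_extract_package_name extract_package_name_alt
  rw [loopB_start, A_eq_resolve]
  rfl
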